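-- pv_equiv track=rewrite | github.com/PengNi/ccsmeth | scripts/comb_2s_features_of_sites.py | _comb_fb_features
-- ===== SOURCE A (Python) =====
-- def _comb_fb_features(fwd_feas, bwd_feas):
--     if len(fwd_feas) <= 0 or len(bwd_feas) <= 0:
--         return []
--     fwd_feas = sorted(fwd_feas, key=lambda x: x[1])
--     bwd_feas = sorted(bwd_feas[::-1], key=lambda x: x[1])
--     comb_feas = []
--     idx_f, idx_b = 0, 0
--     while idx_f < len(fwd_feas) and idx_b < len(bwd_feas):
--         ffea = fwd_feas[idx_f]
--         bfea = bwd_feas[idx_b]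
--         fpos = ffea[1]
--         bpos = bfea[1]
--         if fpos == bpos - 1:
--             ffea[4] = max(ffea[4], bfea[4])
--             comb_feas.append(ffea[:13] + bfea[5:])
--             idx_f += 1
--             idx_b += 1
--         elif fpos < bpos - 1:
--             idx_f += 1
--         else:
--             idx_b += 1
--     return comb_feas
-- ===== SOURCE B (Python) =====
-- def _comb_fb_features(fwd_feas, bwd_feas):
--     if len(fwd_feas) <= 0 or len(bwd_feas) <= 0:
--         return []
--     # FIFO queues of bwd features keyed by position; iterating bwd_feas[::-1]
--     # reproduces the reversed-then-stable-sort tie order of equal positions.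
--     queues = {}
--     for bfea in bwd_feas[::-1]:
--         queues.setdefault(bfea[1], []).append(bfea)
--     comb_feas = []
--     for ffea in sorted(fwd_feas, key=lambda x: x[1]):
--         q = queues.get(ffea[1] + 1)
--         if q:
--             bfea = q.pop(0)
--             ffea[4] = max(ffea[4], bfea[4])
--             comb_feas.append(ffea[:13] + bfea[5:])
--     return comb_feas
-- ===== Notes on version B (the rewrite author's own statement) =====
-- stated objective: alternative
-- what changed: Replaces the two-pointer merge of two sorted lists by a position-keyed dict of FIFO queues built from reversed bwd_feas (bwd_feas is never sorted) plus a single pass over fwd_feas sorted by position.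
import Mathlib
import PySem

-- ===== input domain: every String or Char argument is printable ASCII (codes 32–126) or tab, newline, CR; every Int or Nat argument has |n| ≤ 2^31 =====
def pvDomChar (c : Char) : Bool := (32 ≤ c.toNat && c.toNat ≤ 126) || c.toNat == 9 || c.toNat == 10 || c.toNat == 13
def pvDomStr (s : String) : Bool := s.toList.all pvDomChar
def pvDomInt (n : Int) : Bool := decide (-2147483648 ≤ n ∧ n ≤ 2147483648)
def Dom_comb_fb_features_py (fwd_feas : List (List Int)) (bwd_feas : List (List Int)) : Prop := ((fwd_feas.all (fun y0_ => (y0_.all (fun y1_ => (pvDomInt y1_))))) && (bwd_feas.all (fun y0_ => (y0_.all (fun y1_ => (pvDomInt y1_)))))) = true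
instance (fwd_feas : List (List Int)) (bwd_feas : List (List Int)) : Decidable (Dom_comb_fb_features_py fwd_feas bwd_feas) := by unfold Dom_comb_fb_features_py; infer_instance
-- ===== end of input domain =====

-- B replaces A's two-pointer merge of two sorted lists by a dict of per-position FIFO queues
-- (bwd_feas is never sorted) plus one pass over fwd_feas sorted by position: objective 'alternative'.
-- Both Pythons mutate matched fwd rows in place (ffea[4] = max(...)); the equivalence proved here is about the return value.

-- ===== PORT A =====
-- key lambda x: x[1]  (rows have length >= 5 inside Pre_, so index 1/4 never raises there)
def pvKey (r : List Int) : Int := PySem.List.pyGetD r 1 0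

-- ffea[4] = max(ffea[4], bfea[4]); ffea[:13] + bfea[5:]  (shared verbatim by both Pythons)
def pvRow (f b : List Int) : List Int :=
  PySem.List.slice (PySem.List.pySetD f 4 (max (PySem.List.pyGetD f 4 0) (PySem.List.pyGetD b 4 0))) none (some 13)
    ++ PySem.List.slice b (some 5) none

-- the while-loop over idx_f/idx_b: a two-pointer walk, i.e. structural recursion on the two sorted lists
def combA_loop : List (List Int) → List (List Int) → List (List Int)
  | [], _ => []
  | _ :: _, [] => []
  | f :: fs, b :: bs =>
    if pvKey f = pvKey b - 1 then pvRow f b :: combA_loop fs bs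
    else if pvKey f < pvKey b - 1 then combA_loop fs (b :: bs)
    else combA_loop (f :: fs) bs
termination_by fs bs => fs.length + bs.length
decreasing_by all_goals simp_wf <;> omega

def comb_fb_features_py (fwd_feas : List (List Int)) (bwd_feas : List (List Int)) : List (List Int) :=
  if fwd_feas.length ≤ 0 ∨ bwd_feas.length ≤ 0 then []
  else
    -- bwd_feas[::-1] is List.reverse (PySem.List.slice?_none_none_neg_one)
    combA_loop (PySem.List.sorted fwd_feas pvKey) (PySem.List.sorted bwd_feas.reverse pvKey)

-- ===== PORT B =====
-- queues.setdefault(bfea[1], []).append(bfea) over bwd_feas[::-1]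
def combB_queues (bwd_feas : List (List Int)) : PySem.Dict Int (List (List Int)) :=
  bwd_feas.reverse.foldl (fun d b => d.modify (pvKey b) [] (· ++ [b])) PySem.Dict.empty

-- q = queues.get(ffea[1] + 1); if q: bfea = q.pop(0); …  (None and [] are both falsy: default [])
def combB_step (st : List (List Int) × PySem.Dict Int (List (List Int))) (f : List Int) :
    List (List Int) × PySem.Dict Int (List (List Int)) :=
  match st.2.getD (pvKey f + 1) [] with
  | [] => st
  | b :: rest => (st.1 ++ [pvRow f b], st.2.insert (pvKey f + 1) rest)

def comb_fb_features_py_alt (fwd_feas : List (List Int)) (bwd_feas : List (List Int)) : List (List Int) :=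
  if fwd_feas.length ≤ 0 ∨ bwd_feas.length ≤ 0 then []
  else ((PySem.List.sorted fwd_feas pvKey).foldl combB_step ([], combB_queues bwd_feas)).1

-- ===== PRECONDITION & SPEC =====
-- Pre_ excludes inputs where both lists are nonempty and some row is too short: a row shorter than 2
-- makes Python A raise IndexError at the sort key x[1], and a row shorter than 5 whose pairing
-- position occurs in the other list risks IndexError at x[4]; on a few excluded inputs the short row
-- is never actually paired (its queue is exhausted) and A happens to return anyway (see the cite).
def Pre_comb_fb_features_py (fwd_feas : List (List Int)) (bwd_feas : List (List Int)) : Prop :=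
  fwd_feas = [] ∨ bwd_feas = [] ∨
    ((∀ r ∈ fwd_feas, 2 ≤ r.length ∧ ((pvKey r + 1) ∈ bwd_feas.map pvKey → 5 ≤ r.length)) ∧
     (∀ r ∈ bwd_feas, 2 ≤ r.length ∧ ((pvKey r - 1) ∈ fwd_feas.map pvKey → 5 ≤ r.length)))
instance (fwd_feas : List (List Int)) (bwd_feas : List (List Int)) : Decidable (Pre_comb_fb_features_py fwd_feas bwd_feas) := by unfold Pre_comb_fb_features_py; infer_instance

def pvWitness_comb_fb_features_py : List (List Int) × List (List Int) :=
  ([[7, 0, 0, 0, 2]], [[8, 1, 0, 0, 3]])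

def Spec_comb_fb_features_py (fwd_feas : List (List Int)) (bwd_feas : List (List Int)) (out : List (List Int)) : Prop := out = comb_fb_features_py_alt fwd_feas bwd_feas
instance (fwd_feas : List (List Int)) (bwd_feas : List (List Int)) (out : List (List Int)) : Decidable (Spec_comb_fb_features_py fwd_feas bwd_feas out) := by unfold Spec_comb_fb_features_py; infer_instance

-- ===== CLAIM (what is proved, stated in full; the proofs are below) =====
def Claim_equal_comb_fb_features_py : Prop := ∀ (fwd_feas : List (List Int)) (bwd_feas : List (List Int)), Dom_comb_fb_features_py fwd_feas bwd_feas → Pre_comb_fb_features_py fwd_feas bwd_feas → Spec_comb_fb_features_py fwd_feas bwd_feas (comb_fb_features_py fwd_feas bwd_feas)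

-- ===== LEMMAS AND PROOFS =====

-- the common greedy specification: for each fwd row in order, extract the first remaining bwd row at position+1
def extractQ (c : Int) : List (List Int) → Option (List Int × List (List Int))
  | [] => none
  | b :: bs => if pvKey b = c then some (b, bs)
               else (extractQ c bs).map (fun p => (p.1, b :: p.2))

def gGreedy : List (List Int) → List (List Int) → List (List Int)
  | [], _ => []
  | f :: fs, B =>
    match extractQ (pvKey f + 1) B with
    | none => gGreedy fs B
    | some (b, B') => pvRow f b :: gGreedy fs B'

theorem extractQ_eq_none {c : Int} {B : List (List Int)} (h : ∀ b ∈ B, pvKey b ≠ c) :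
    extractQ c B = none := by
  induction B with
  | nil => rfl
  | cons b bs ih =>
    simp only [extractQ, if_neg (h b (by simp))]
    rw [ih (fun x hx => h x (by simp [hx]))]; rfl

theorem gGreedy_nil_right (fs : List (List Int)) : gGreedy fs [] = [] := by
  induction fs with
  | nil => rfl
  | cons f fs ih => simp only [gGreedy, extractQ]; exact ih

theorem gGreedy_skip (fs : List (List Int)) (b : List Int) (bs : List (List Int))
    (h : ∀ f ∈ fs, pvKey f + 1 ≠ pvKey b) : gGreedy fs (b :: bs) = gGreedy fs bs := by
  induction fs generalizing bs with
  | nil => rfl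
  | cons f fs ih =>
    have hb : ¬ pvKey b = pvKey f + 1 := fun e => h f (by simp) e.symm
    simp only [gGreedy, extractQ, if_neg hb]
    cases hq : extractQ (pvKey f + 1) bs with
    | none => simp only [Option.map_none]; exact ih bs (fun x hx => h x (by simp [hx]))
    | some p =>
      simp only [Option.map_some]
      rw [ih p.2 (fun x hx => h x (by simp [hx]))]

theorem combA_eq_g (n : Nat) : ∀ (fs bs : List (List Int)), fs.length + bs.length ≤ n →
    fs.Pairwise (fun a b => pvKey a ≤ pvKey b) → bs.Pairwise (fun a b => pvKey a ≤ pvKey b) →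
    combA_loop fs bs = gGreedy fs bs := by
  induction n with
  | zero =>
    intro fs bs hn _ _
    have : fs = [] := by cases fs <;> simp_all
    subst this; rw [combA_loop]; rfl
  | succ n ih =>
    intro fs bs hn hf hb
    match fs, bs with
    | [], bs => rw [combA_loop]; rfl
    | f :: fs, [] => rw [gGreedy_nil_right, combA_loop]
    | f :: fs, b :: bs =>
      rw [combA_loop]
      by_cases h1 : pvKey f = pvKey b - 1
      · rw [if_pos h1]
        have hbk : pvKey b = pvKey f + 1 := by omega
        simp only [gGreedy, extractQ, if_pos hbk]
        rw [ih fs bs (by simp at hn ⊢; omega) hf.tail hb.tail]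
      · rw [if_neg h1]
        by_cases h2 : pvKey f < pvKey b - 1
        · rw [if_pos h2]
          have hnone : extractQ (pvKey f + 1) (b :: bs) = none := by
            apply extractQ_eq_none
            intro x hx
            rcases List.mem_cons.mp hx with rfl | hx'
            · omega
            · have := (List.pairwise_cons.mp hb).1 x hx'; omega
          simp only [gGreedy, hnone]
          rw [ih fs (b :: bs) (by simp at hn ⊢; omega) hf.tail hb]
        · rw [if_neg h2]
          rw [gGreedy_skip (f :: fs) b bs]
          · exact ih (f :: fs) bs (by simp at hn ⊢; omega) hf hb.tail
          · intro x hx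
            rcases List.mem_cons.mp hx with rfl | hx'
            · omega
            · have := (List.pairwise_cons.mp hf).1 x hx'; omega

theorem extractQ_of_filter : ∀ (B : List (List Int)) (b : List Int) (rest : List (List Int)) (c : Int),
    B.filter (fun x => pvKey x == c) = b :: rest →
    ∃ B', extractQ c B = some (b, B') ∧
      ∀ c', B'.filter (fun x => pvKey x == c') =
        if c' = c then rest else B.filter (fun x => pvKey x == c') := by
  intro B
  induction B with
  | nil => intro b rest c h; simp at h
  | cons x B ih =>
    intro b rest c h
    by_cases hx : pvKey x = c
    · rw [List.filter_cons_of_pos (by simp [hx])] at h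
      obtain ⟨rfl, rfl⟩ : x = b ∧ B.filter (fun x => pvKey x == c) = rest := by
        constructor <;> [exact (List.cons.injEq _ _ _ _ ▸ h).1; exact (List.cons.injEq _ _ _ _ ▸ h).2]
      refine ⟨B, by simp [extractQ, hx], ?_⟩
      intro c'
      by_cases hc : c' = c
      · simp [hc]
      · rw [if_neg hc, List.filter_cons_of_neg (by simp; omega)]
    · rw [List.filter_cons_of_neg (by simp [hx])] at h
      obtain ⟨B', hB', hfil⟩ := ih b rest c h
      refine ⟨x :: B', ?_, ?_⟩
      · simp [extractQ, hx, hB']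
      · intro c'
        by_cases hc : c' = c
        · subst hc
          rw [if_pos rfl, List.filter_cons_of_neg (by simp [hx])]
          simpa using hfil c'
        · rw [if_neg hc]
          have := hfil c'
          rw [if_neg hc] at this
          by_cases hxc : pvKey x = c'
          · rw [List.filter_cons_of_pos (by simp [hxc]), List.filter_cons_of_pos (by simp [hxc]), this]
          · rw [List.filter_cons_of_neg (by simp [hxc]), List.filter_cons_of_neg (by simp [hxc]), this]

theorem foldB_eq_g : ∀ (fs B : List (List Int)) (acc : List (List Int))
    (d : PySem.Dict Int (List (List Int))),
    (∀ c, d.getD c [] = B.filter (fun x => pvKey x == c)) →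
    (fs.foldl combB_step (acc, d)).1 = acc ++ gGreedy fs B := by
  intro fs
  induction fs with
  | nil => intro B acc d _; simp [gGreedy]
  | cons f fs ih =>
    intro B acc d hd
    rw [List.foldl_cons]
    cases hfil : B.filter (fun x => pvKey x == pvKey f + 1) with
    | nil =>
      have hstep : combB_step (acc, d) f = (acc, d) := by
        simp only [combB_step, hd (pvKey f + 1), hfil]
      have hnone : extractQ (pvKey f + 1) B = none := by
        apply extractQ_eq_none
        intro x hx hk
        have : x ∈ B.filter (fun x => pvKey x == pvKey f + 1) := by
          simp [List.mem_filter, hx, hk]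
        rw [hfil] at this; simp at this
      rw [hstep, ih B acc d hd]
      simp only [gGreedy, hnone]
    | cons b rest =>
      obtain ⟨B', hB', hfil'⟩ := extractQ_of_filter B b rest (pvKey f + 1) hfil
      have hstep : combB_step (acc, d) f = (acc ++ [pvRow f b], d.insert (pvKey f + 1) rest) := by
        simp only [combB_step, hd (pvKey f + 1), hfil]
      rw [hstep, ih B' (acc ++ [pvRow f b]) (d.insert (pvKey f + 1) rest) ?_]
      · simp only [gGreedy, hB', List.append_assoc, List.singleton_append]
      · intro c
        rw [PySem.Dict.getD_insert, hfil' c]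
        by_cases hc : c = pvKey f + 1 <;> simp [hc, hd]

theorem queues_getD (bwd_feas : List (List Int)) (c : Int) :
    (combB_queues bwd_feas).getD c [] = bwd_feas.reverse.filter (fun x => pvKey x == c) := by
  unfold combB_queues
  have hmap : bwd_feas.reverse.foldl (fun d b => d.modify (pvKey b) [] (· ++ [b])) PySem.Dict.empty
      = (bwd_feas.reverse.map (fun b => (pvKey b, b))).foldl
          (fun d p => d.modify p.1 [] (· ++ [p.2])) PySem.Dict.empty := by
    rw [List.foldl_map]
  rw [hmap, PySem.Dict.getD_foldl_modify_append, List.filter_map, List.map_map]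
  simp [PySem.Dict.getD_empty, Function.comp_def]

theorem insertBy_filter (x : List Int) (zs : List (List Int)) (c : Int)
    (h : zs.Pairwise (fun a b => pvKey a ≤ pvKey b)) :
    (PySem.List.insertBy (fun a b => decide (pvKey a < pvKey b)) x zs).filter (fun r => pvKey r == c)
      = zs.filter (fun r => pvKey r == c) ++ if pvKey x == c then [x] else [] := by
  induction zs with
  | nil => simp [PySem.List.insertBy, List.filter_singleton, beq_iff_eq]
  | cons z zs ih =>
    rw [PySem.List.insertBy]
    by_cases hlt : pvKey x < pvKey z
    · rw [if_pos (by simpa using hlt)]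
      by_cases hxc : pvKey x = c
      · have hnil : (z :: zs).filter (fun r => pvKey r == c) = [] := by
          rw [List.filter_eq_nil_iff]
          intro a ha
          rcases List.mem_cons.mp ha with rfl | ha'
          · simp; omega
          · have := (List.pairwise_cons.mp h).1 a ha'; simp; omega
        rw [List.filter_cons_of_pos (by simp [hxc]), hnil]
        simp [hxc]
      · rw [List.filter_cons_of_neg (by simp [hxc])]
        simp [hxc]
    · rw [if_neg (by simpa using hlt)]
      by_cases hzc : pvKey z = c
      · rw [List.filter_cons_of_pos (by simp [hzc]), List.filter_cons_of_pos (by simp [hzc]),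
          ih h.tail, List.cons_append]
      · rw [List.filter_cons_of_neg (by simp [hzc]), List.filter_cons_of_neg (by simp [hzc]),
          ih h.tail]

theorem sorted_filter_stable (xs : List (List Int)) (c : Int) :
    (PySem.List.sorted xs pvKey).filter (fun r => pvKey r == c)
      = xs.filter (fun r => pvKey r == c) := by
  induction xs using List.reverseRecOn with
  | nil => rw [PySem.List.sorted_eq_foldl_insertBy]; rfl
  | append_singleton ys x ih =>
    have h1 : PySem.List.sorted (ys ++ [x]) pvKey
        = PySem.List.insertBy (fun a b => decide (pvKey a < pvKey b)) x (PySem.List.sorted ys pvKey) := by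
      rw [PySem.List.sorted_eq_foldl_insertBy, PySem.List.sorted_eq_foldl_insertBy, List.foldl_append]
      rfl
    rw [h1, insertBy_filter x _ c (PySem.List.sorted_pairwise ys pvKey), ih, List.filter_append]
    congr 1
    rw [List.filter_singleton]
    by_cases hxc : pvKey x = c <;> simp [cond_eq_ite, beq_iff_eq, hxc]

-- ===== VERDICT (by name: the statement is the Claim_ definition above) =====
theorem comb_fb_features_py_spec : Claim_equal_comb_fb_features_py := by
  intro fwd_feas bwd_feas _ _
  unfold Spec_comb_fb_features_py comb_fb_features_py comb_fb_features_py_alt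
  by_cases h : fwd_feas.length ≤ 0 ∨ bwd_feas.length ≤ 0
  · rw [if_pos h, if_pos h]
  · rw [if_neg h, if_neg h]
    rw [combA_eq_g ((PySem.List.sorted fwd_feas pvKey).length + (PySem.List.sorted bwd_feas.reverse pvKey).length)
        _ _ le_rfl (PySem.List.sorted_pairwise _ _) (PySem.List.sorted_pairwise _ _)]
    rw [foldB_eq_g (PySem.List.sorted fwd_feas pvKey) (PySem.List.sorted bwd_feas.reverse pvKey) [] _ ?_]
    · simp
    · intro c
      rw [queues_getD, ← sorted_filter_stable]
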